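-- pv_equiv track=rewrite | github.com/j5int/processfamily | processfamily/processes.py | _affinity_mask_to_list
-- ===== SOURCE A (Python) =====
-- def _affinity_mask_to_list(mask):
--     """converts a mask to a list of cores"""
--     cores = []
--     i = 0
--     while mask:
--         if mask % 2:
--             cores.append(i)
--         mask >>= 1
--         i += 1
--     return cores
-- ===== SOURCE B (Python) =====
-- def _affinity_mask_to_list(mask):
--     """converts a mask to a list of cores"""
--     cores = []
--     while mask:
--         low = mask & -mask
--         cores.append(low.bit_length() - 1)
--         mask ^= low
--     return cores
-- ===== Notes on version B (the rewrite author's own statement) =====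
-- stated objective: idiomatic
-- what changed: Replaced the bit-by-bit scan with a counter by the lowest-set-bit idiom: isolate the least significant set bit with mask & -mask, emit its index via bit_length, and clear it with xor, iterating only over set bits.
import Mathlib
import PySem

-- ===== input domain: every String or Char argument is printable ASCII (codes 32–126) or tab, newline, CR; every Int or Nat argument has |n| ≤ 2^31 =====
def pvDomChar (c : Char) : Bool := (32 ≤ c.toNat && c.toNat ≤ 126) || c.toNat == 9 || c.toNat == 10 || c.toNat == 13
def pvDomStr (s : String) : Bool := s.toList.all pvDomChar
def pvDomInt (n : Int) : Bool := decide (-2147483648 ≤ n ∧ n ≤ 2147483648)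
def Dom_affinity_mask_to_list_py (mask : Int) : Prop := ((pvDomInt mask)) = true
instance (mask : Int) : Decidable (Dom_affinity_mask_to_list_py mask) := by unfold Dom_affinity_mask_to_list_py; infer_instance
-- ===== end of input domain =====

-- B replaces A's bit-by-bit scan with the lowest-set-bit idiom (mask & -mask / bit_length / xor),
-- iterating only over the set bits; same return value on every mask ≥ 0 (A never returns on mask < 0).

-- ===== termination support (cited by the ports' decreasing_by) =====
theorem pvK1 (n : Nat) (h : n % 2 = 1) : n &&& (n - 1) = n - 1 := by
  apply Nat.eq_of_testBit_eq
  intro i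
  cases i with
  | zero =>
      rw [Nat.testBit_and]
      have h2 : (n - 1) % 2 = 0 := by omega
      simp [Nat.testBit_zero, h, h2]
  | succ i =>
      rw [Nat.testBit_and]
      simp only [Nat.testBit_succ]
      rw [show (n - 1) / 2 = n / 2 from by omega, Bool.and_self]

theorem pvK2 (m : Nat) : (2 * m) &&& (2 * m - 1) = 2 * (m &&& (m - 1)) := by
  apply Nat.eq_of_testBit_eq
  intro i
  cases i with
  | zero =>
      rw [Nat.testBit_and]
      have h1 : 2 * m % 2 = 0 := by omega
      have h2 : 2 * (m &&& (m - 1)) % 2 = 0 := by omega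
      simp [Nat.testBit_zero, h1, h2]
  | succ i =>
      rw [Nat.testBit_and]
      simp only [Nat.testBit_succ]
      rw [show 2 * m / 2 = m from by omega, show (2 * m - 1) / 2 = m - 1 from by omega,
        show 2 * (m &&& (m - 1)) / 2 = m &&& (m - 1) from by omega, Nat.testBit_and]

theorem pvK3 (n : Nat) (h : n % 2 = 1) : n ^^^ 1 = n - 1 := by
  apply Nat.eq_of_testBit_eq
  intro i
  cases i with
  | zero =>
      rw [Nat.testBit_xor]
      have h2 : (n - 1) % 2 = 0 := by omega
      simp [Nat.testBit_zero, h, h2]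
  | succ i =>
      rw [Nat.testBit_xor]
      simp only [Nat.testBit_succ]
      rw [show (1 : Nat) / 2 = 0 from by omega, show (n - 1) / 2 = n / 2 from by omega,
        Nat.zero_testBit, Bool.xor_false]

theorem pvK4 (m l : Nat) : (2 * m) ^^^ (2 * l) = 2 * (m ^^^ l) := by
  apply Nat.eq_of_testBit_eq
  intro i
  cases i with
  | zero =>
      rw [Nat.testBit_xor]
      have h1 : 2 * m % 2 = 0 := by omega
      have h2 : 2 * l % 2 = 0 := by omega
      have h3 : 2 * (m ^^^ l) % 2 = 0 := by omega
      simp [Nat.testBit_zero, h1, h2, h3]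
  | succ i =>
      rw [Nat.testBit_xor]
      simp only [Nat.testBit_succ]
      rw [show 2 * m / 2 = m from by omega, show 2 * l / 2 = l from by omega,
        show 2 * (m ^^^ l) / 2 = m ^^^ l from by omega, Nat.testBit_xor]

-- clearing the lowest set bit: n XOR (n - (n AND (n-1))) = n AND (n-1)
theorem pv_xor_low (n : Nat) (h : 0 < n) : n ^^^ (n - (n &&& (n - 1))) = n &&& (n - 1) := by
  induction n using Nat.strong_induction_on with
  | _ n ih =>
    rcases Nat.even_or_odd n with he | ho
    · obtain ⟨m, hm⟩ := he
      have hm' : n = 2 * m := by omega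
      subst hm'
      have hmpos : 0 < m := by omega
      have hand : m &&& (m - 1) ≤ m - 1 := Nat.and_le_right
      rw [pvK2, show 2 * m - 2 * (m &&& (m - 1)) = 2 * (m - (m &&& (m - 1))) from by omega,
        pvK4, ih m (by omega) hmpos]
    · have h1 : n % 2 = 1 := Nat.odd_iff.mp ho
      rw [pvK1 n h1, show n - (n - 1) = 1 from by omega, pvK3 n h1]

theorem pv_shiftRight_one (n : Nat) : ((n : Int) >>> (1 : Nat)) = ((n / 2 : Nat) : Int) := by
  change Int.shiftRight _ _ = _
  simp [Int.shiftRight, Nat.shiftRight_one]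

theorem pvA_dec (mask : Int) (h : 0 < mask) : (mask >>> (1 : Nat)).toNat < mask.toNat := by
  obtain ⟨n, rfl⟩ : ∃ n : Nat, mask = (n : Int) :=
    ⟨mask.toNat, (Int.toNat_of_nonneg (le_of_lt h)).symm⟩
  rw [pv_shiftRight_one]
  simp only [Int.toNat_natCast]
  omega

theorem pv_band_neg (n : Nat) (h : 0 < n) :
    PySem.Int.band (n : Int) (-(n : Int)) = ((n - (n &&& (n - 1)) : Nat) : Int) := by
  unfold PySem.Int.band
  have h1 : (0 : Int) ≤ (n : Int) := by omega
  have h2 : ¬ ((0 : Int) ≤ -(n : Int)) := by omega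
  rw [if_pos h1, if_neg h2]
  have h3 : (-(-(n : Int)) - 1).toNat = n - 1 := by omega
  have h4 : ((n : Int)).toNat = n := by omega
  rw [h3, h4]

theorem pv_bxor_band (n : Nat) (h : 0 < n) :
    PySem.Int.bxor (n : Int) (PySem.Int.band (n : Int) (-(n : Int))) = ((n &&& (n - 1) : Nat) : Int) := by
  rw [pv_band_neg n h, PySem.Int.bxor_natCast, pv_xor_low n h]

theorem pvB_dec (mask : Int) (h : 0 < mask) :
    (PySem.Int.bxor mask (PySem.Int.band mask (-mask))).toNat < mask.toNat := by
  obtain ⟨n, rfl⟩ : ∃ n : Nat, mask = (n : Int) :=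
    ⟨mask.toNat, (Int.toNat_of_nonneg (le_of_lt h)).symm⟩
  have hn : 0 < n := by omega
  rw [pv_bxor_band n hn]
  have hle : n &&& (n - 1) ≤ n - 1 := Nat.and_le_right
  simp only [Int.toNat_natCast]
  omega

-- ===== PORT A =====
-- while mask: …  — on mask < 0 the Python loop never terminates, so A returns only for mask ≥ 0
-- (Pre_ below); the 0 < mask guard is a totality guard agreeing with Python's test on that domain.
def pvALoop (mask : Int) (i : Int) (cores : List Int) : List Int :=
  if h : 0 < mask then
    pvALoop (mask >>> (1 : Nat)) (i + 1)
      (if PySem.Int.mod mask 2 ≠ 0 then cores ++ [i] else cores)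
  else cores
termination_by mask.toNat
decreasing_by exact pvA_dec mask h

def affinity_mask_to_list_py (mask : Int) : List Int := pvALoop mask 0 []

-- ===== PORT B =====
def pvBLoop (mask : Int) (cores : List Int) : List Int :=
  if h : 0 < mask then
    pvBLoop (PySem.Int.bxor mask (PySem.Int.band mask (-mask)))
      (cores ++ [((PySem.Int.bitLength (PySem.Int.band mask (-mask)) : Nat) : Int) - 1])
  else cores
termination_by mask.toNat
decreasing_by exact pvB_dec mask h

def affinity_mask_to_list_py_alt (mask : Int) : List Int := pvBLoop mask []

-- ===== PRECONDITION & SPEC =====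
-- A's while loop never terminates on mask < 0 (mask >>= 1 keeps mask negative), so A returns only on mask ≥ 0.
def Pre_affinity_mask_to_list_py (mask : Int) : Prop := 0 ≤ mask
instance (mask : Int) : Decidable (Pre_affinity_mask_to_list_py mask) := by
  unfold Pre_affinity_mask_to_list_py; infer_instance

def pvWitness_affinity_mask_to_list_py : Int := (44)

def Spec_affinity_mask_to_list_py (mask : Int) (out : List Int) : Prop := out = affinity_mask_to_list_py_alt mask
instance (mask : Int) (out : List Int) : Decidable (Spec_affinity_mask_to_list_py mask out) := by
  unfold Spec_affinity_mask_to_list_py; infer_instance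

-- ===== CLAIM (what is proved, stated in full; the proofs are below) =====
def Claim_equal_affinity_mask_to_list_py : Prop := ∀ (mask : Int), Dom_affinity_mask_to_list_py mask → Pre_affinity_mask_to_list_py mask → Spec_affinity_mask_to_list_py mask (affinity_mask_to_list_py mask)

-- ===== LEMMAS AND PROOFS =====

-- reference: the list of set-bit indices of n, low bit first
def pvBits (n : Nat) : List Nat :=
  if h : 0 < n then (if n % 2 = 1 then [0] else []) ++ (pvBits (n / 2)).map (· + 1) else []
termination_by n
decreasing_by exact Nat.div_lt_self h (by norm_num)

theorem pvBits_zero : pvBits 0 = [] := by unfold pvBits; simp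

theorem pvBits_two_mul (m : Nat) : pvBits (2 * m) = (pvBits m).map (· + 1) := by
  rcases Nat.eq_zero_or_pos m with h0 | hpos
  · subst h0; simp [pvBits_zero]
  · rw [pvBits]
    have h1 : 0 < 2 * m := by omega
    have h2 : ¬ (2 * m % 2 = 1) := by omega
    have h3 : 2 * m / 2 = m := by omega
    rw [dif_pos h1, if_neg h2, h3, List.nil_append]

theorem pvBits_odd (n : Nat) (h : n % 2 = 1) : pvBits n = 0 :: pvBits (n - 1) := by
  rw [pvBits]
  have h1 : 0 < n := by omega
  rw [dif_pos h1, if_pos h]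
  have : n - 1 = 2 * (n / 2) := by omega
  rw [this, pvBits_two_mul]
  rfl

theorem pv_bl_pos (l : Nat) (h : 0 < l) : 1 ≤ PySem.Int.bitLength ((l : Nat) : Int) := by
  rw [PySem.Int.bitLength_natCast h]
  omega

-- head/tail characterisation driving B's loop
theorem pvBITS (n : Nat) (h : 0 < n) :
    pvBits n = (PySem.Int.bitLength ((n - (n &&& (n - 1)) : Nat) : Int) - 1) :: pvBits (n &&& (n - 1)) := by
  induction n using Nat.strong_induction_on with
  | _ n ih =>
    rcases Nat.even_or_odd n with he | ho
    · obtain ⟨m, hm⟩ := he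
      have hm' : n = 2 * m := by omega
      subst hm'
      have hmpos : 0 < m := by omega
      have hand : m &&& (m - 1) ≤ m - 1 := Nat.and_le_right
      have hlowpos : 0 < m - (m &&& (m - 1)) := by omega
      have hbl : PySem.Int.bitLength ((2 * (m - (m &&& (m - 1))) : Nat) : Int)
          = PySem.Int.bitLength ((m - (m &&& (m - 1)) : Nat) : Int) + 1 := by
        rw [PySem.Int.bitLength_natCast (by omega)]
        congr 2
        omega
      have hblpos := pv_bl_pos (m - (m &&& (m - 1))) hlowpos
      rw [pvBits_two_mul, ih m (by omega) hmpos, pvK2,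
        show 2 * m - 2 * (m &&& (m - 1)) = 2 * (m - (m &&& (m - 1))) from by omega,
        hbl, pvBits_two_mul]
      simp only [List.map_cons]
      congr 1
      omega
    · have h1 : n % 2 = 1 := Nat.odd_iff.mp ho
      have hand : n &&& (n - 1) = n - 1 := pvK1 n h1
      rw [show n - (n &&& (n - 1)) = 1 from by omega, hand, pvBits_odd n h1,
        show PySem.Int.bitLength ((1 : Nat) : Int) = 1 from by decide]

-- A's loop produces the bit indices shifted by the running counter i
theorem pvLA (n : Nat) (i : Int) (cores : List Int) :
    pvALoop ((n : Nat) : Int) i cores = cores ++ (pvBits n).map (fun (j : Nat) => (j : Int) + i) := by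
  induction n using Nat.strong_induction_on generalizing i cores with
  | _ n ih =>
    rcases Nat.eq_zero_or_pos n with h0 | hpos
    · subst h0
      rw [pvALoop, pvBits_zero]
      simp
    · have hbitsn : pvBits n = (if n % 2 = 1 then [0] else []) ++ (pvBits (n / 2)).map (· + 1) := by
        rw [pvBits]
        rw [dif_pos hpos]
      rw [pvALoop]
      have hg : (0 : Int) < ((n : Nat) : Int) := by exact_mod_cast hpos
      rw [dif_pos hg, pv_shiftRight_one, ih (n / 2) (Nat.div_lt_self hpos (by norm_num)), hbitsn]
      have hmod : PySem.Int.mod ((n : Nat) : Int) 2 = ((n % 2 : Nat) : Int) := by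
        exact_mod_cast PySem.Int.mod_natCast n 2
      rw [hmod]
      have hmap : ∀ (l : List Nat), l.map (fun (j : Nat) => (j : Int) + (i + 1))
          = (l.map (· + 1)).map (fun (j : Nat) => (j : Int) + i) := by
        intro l
        rw [List.map_map]
        apply List.map_congr_left
        intro j _
        simp only [Function.comp_apply]
        push_cast
        ring
      rcases Nat.mod_two_eq_zero_or_one n with hpar | hpar
      · rw [hpar]
        rw [if_neg (by simp), if_neg (by omega), hmap]
        simp
      · rw [hpar]
        rw [if_pos (by simp), if_pos (by omega), hmap]
        simp

-- B's loop produces exactly the bit indices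
theorem pvLB (n : Nat) (cores : List Int) :
    pvBLoop ((n : Nat) : Int) cores = cores ++ (pvBits n).map (fun (j : Nat) => (j : Int)) := by
  induction n using Nat.strong_induction_on generalizing cores with
  | _ n ih =>
    rcases Nat.eq_zero_or_pos n with h0 | hpos
    · subst h0
      rw [pvBLoop, pvBits_zero]
      simp
    · rw [pvBLoop]
      have hg : (0 : Int) < ((n : Nat) : Int) := by exact_mod_cast hpos
      rw [dif_pos hg, pv_bxor_band n hpos, pv_band_neg n hpos]
      have hlt : n &&& (n - 1) < n := by
        have hle : n &&& (n - 1) ≤ n - 1 := Nat.and_le_right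
        omega
      rw [ih (n &&& (n - 1)) hlt, pvBITS n hpos]
      have hlowpos : 0 < n - (n &&& (n - 1)) := by
        have hle : n &&& (n - 1) ≤ n - 1 := Nat.and_le_right
        omega
      have hblpos := pv_bl_pos (n - (n &&& (n - 1))) hlowpos
      have hhead : ((PySem.Int.bitLength ((n - (n &&& (n - 1)) : Nat) : Int) : Nat) : Int) - 1
          = ((PySem.Int.bitLength ((n - (n &&& (n - 1)) : Nat) : Int) - 1 : Nat) : Int) := by
        omega
      rw [hhead]
      simp

-- ===== VERDICT (by name: the statement is the Claim_ definition above) =====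
theorem affinity_mask_to_list_py_spec : Claim_equal_affinity_mask_to_list_py := by
  intro mask _ hpre
  unfold Spec_affinity_mask_to_list_py affinity_mask_to_list_py affinity_mask_to_list_py_alt
  have hn : mask = ((mask.toNat : Nat) : Int) := (Int.toNat_of_nonneg hpre).symm
  rw [hn, pvLA, pvLB]
  simp
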